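-- pv_equiv track=rewrite | github.com/bighitranpro/BIADS | backend/services/file_parser.py | get_import_stats
-- ===== SOURCE A (Python) =====
-- from typing import List, Dict, Any, Optional
--
-- def get_import_stats(accounts: List[Dict[str, Any]], proxies: List[Dict[str, Any]]) -> Dict[str, Any]:
--     """Get statistics about imported data"""
--
--     total_accounts = len(accounts)
--     accounts_with_cookies = sum(1 for a in accounts if a.get('cookies'))
--     accounts_with_token = sum(1 for a in accounts if a.get('access_token'))
--     accounts_with_2fa = sum(1 for a in accounts if a.get('two_fa_key'))
--     accounts_with_email = sum(1 for a in accounts if a.get('email'))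
--
--     total_proxies = len(proxies)
--     proxies_with_auth = sum(1 for p in proxies if p.get('username'))
--
--     return {
--         'accounts': {
--             'total': total_accounts,
--             'with_cookies': accounts_with_cookies,
--             'with_token': accounts_with_token,
--             'with_2fa': accounts_with_2fa,
--             'with_email': accounts_with_email
--         },
--         'proxies': {
--             'total': total_proxies,
--             'with_auth': proxies_with_auth,
--             'http': sum(1 for p in proxies if p.get('protocol') == 'http'),
--             'socks5': sum(1 for p in proxies if p.get('protocol') == 'socks5')
--         }
--     }
-- ===== SOURCE B (Python) =====
-- from typing import List, Dict, Any
--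
--
-- def _account_labels(a):
--     labels = ['a.total']
--     if a.get('cookies'):
--         labels.append('a.cookies')
--     if a.get('access_token'):
--         labels.append('a.token')
--     if a.get('two_fa_key'):
--         labels.append('a.2fa')
--     if a.get('email'):
--         labels.append('a.email')
--     return labels
--
--
-- def _proxy_labels(p):
--     labels = ['p.total']
--     if p.get('username'):
--         labels.append('p.auth')
--     if p.get('protocol') == 'http':
--         labels.append('p.http')
--     if p.get('protocol') == 'socks5':
--         labels.append('p.socks5')
--     return labels
--
--
-- def get_import_stats(accounts: List[Dict[str, Any]], proxies: List[Dict[str, Any]]) -> Dict[str, Any]: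
--     """Get statistics about imported data (label stream + frequency counter)."""
--     stream = [l for x in accounts for l in _account_labels(x)]
--     stream += [l for x in proxies for l in _proxy_labels(x)]
--     counts = {}
--     for l in stream:
--         counts[l] = counts.get(l, 0) + 1
--     return {
--         'accounts': {
--             'total': counts.get('a.total', 0),
--             'with_cookies': counts.get('a.cookies', 0),
--             'with_token': counts.get('a.token', 0),
--             'with_2fa': counts.get('a.2fa', 0),
--             'with_email': counts.get('a.email', 0)
--         },
--         'proxies': {
--             'total': counts.get('p.total', 0),
--             'with_auth': counts.get('p.auth', 0),
--             'http': counts.get('p.http', 0),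
--             'socks5': counts.get('p.socks5', 0)
--         }
--     }
-- ===== Notes on version B (the rewrite author's own statement) =====
-- stated objective: alternative
-- what changed: B replaces A's eight independent counting comprehensions with a map/flatten/count algorithm: each account/proxy is mapped to a list of label strings, the labels are flattened into one stream, a single frequency dictionary (counter) is built over that stream, and every statistic is read off the counter by key.
import Mathlib
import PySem

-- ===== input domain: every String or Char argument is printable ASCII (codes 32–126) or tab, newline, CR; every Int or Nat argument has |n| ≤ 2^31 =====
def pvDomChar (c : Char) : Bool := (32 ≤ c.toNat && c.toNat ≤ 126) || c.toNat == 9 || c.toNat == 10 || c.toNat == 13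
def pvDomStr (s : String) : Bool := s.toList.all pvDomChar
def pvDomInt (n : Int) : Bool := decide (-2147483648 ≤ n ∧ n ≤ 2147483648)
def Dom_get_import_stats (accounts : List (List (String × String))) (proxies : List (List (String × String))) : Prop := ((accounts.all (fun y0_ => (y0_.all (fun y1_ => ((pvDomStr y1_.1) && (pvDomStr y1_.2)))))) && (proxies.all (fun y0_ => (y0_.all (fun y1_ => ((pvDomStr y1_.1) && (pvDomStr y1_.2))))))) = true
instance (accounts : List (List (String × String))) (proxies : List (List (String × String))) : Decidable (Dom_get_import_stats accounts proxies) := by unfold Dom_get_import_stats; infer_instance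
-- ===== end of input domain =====

-- B replaces A's eight counting comprehensions with a map/flatten/count algorithm:
-- elements become label streams, one frequency counter is built, stats are read off it
-- (objective: alternative; same asymptotic cost).

-- ===== PORT A =====
-- a.get(k) on a Python dict built from the pair list (duplicate keys: last wins), truthiness = nonempty string
def pvGetTruthy (d : List (String × String)) (k : String) : Bool :=
  match (PySem.Dict.ofList d).get? k with
  | some s => s ≠ ""
  | none => false

-- p.get('protocol') == lit
def pvGetEq (d : List (String × String)) (k lit : String) : Bool :=
  match (PySem.Dict.ofList d).get? k with
  | some s => s == lit
  | none => false

-- sum(1 for x in xs if cond x)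
def pvSumIf (xs : List (List (String × String))) (cond : List (String × String) → Bool) : Int :=
  xs.foldl (fun acc x => if cond x then acc + 1 else acc) 0

def get_import_stats (accounts : List (List (String × String))) (proxies : List (List (String × String))) : List (String × List (String × Int)) :=
  let total_accounts : Int := accounts.length
  let accounts_with_cookies := pvSumIf accounts (fun a => pvGetTruthy a "cookies")
  let accounts_with_token := pvSumIf accounts (fun a => pvGetTruthy a "access_token")
  let accounts_with_2fa := pvSumIf accounts (fun a => pvGetTruthy a "two_fa_key")
  let accounts_with_email := pvSumIf accounts (fun a => pvGetTruthy a "email")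
  let total_proxies : Int := proxies.length
  let proxies_with_auth := pvSumIf proxies (fun p => pvGetTruthy p "username")
  [("accounts", [("total", total_accounts),
                 ("with_cookies", accounts_with_cookies),
                 ("with_token", accounts_with_token),
                 ("with_2fa", accounts_with_2fa),
                 ("with_email", accounts_with_email)]),
   ("proxies", [("total", total_proxies),
                ("with_auth", proxies_with_auth),
                ("http", pvSumIf proxies (fun p => pvGetEq p "protocol" "http")),
                ("socks5", pvSumIf proxies (fun p => pvGetEq p "protocol" "socks5"))])]

-- ===== PORT B =====
-- _account_labels: the list of statistic labels an account contributes to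
def pvAccLabels (a : List (String × String)) : List String :=
  ["a.total"]
    ++ (if pvGetTruthy a "cookies" then ["a.cookies"] else [])
    ++ (if pvGetTruthy a "access_token" then ["a.token"] else [])
    ++ (if pvGetTruthy a "two_fa_key" then ["a.2fa"] else [])
    ++ (if pvGetTruthy a "email" then ["a.email"] else [])

-- _proxy_labels: the list of statistic labels a proxy contributes to
def pvProxLabels (p : List (String × String)) : List String :=
  ["p.total"]
    ++ (if pvGetTruthy p "username" then ["p.auth"] else [])
    ++ (if pvGetEq p "protocol" "http" then ["p.http"] else [])
    ++ (if pvGetEq p "protocol" "socks5" then ["p.socks5"] else [])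

def get_import_stats_alt (accounts : List (List (String × String))) (proxies : List (List (String × String))) : List (String × List (String × Int)) :=
  let stream := accounts.flatMap pvAccLabels ++ proxies.flatMap pvProxLabels
  -- counts[l] = counts.get(l, 0) + 1, one pass over the stream
  let counts : PySem.Dict String Int :=
    stream.foldl (fun d l => d.insert l (d.getD l 0 + 1)) PySem.Dict.empty
  [("accounts", [("total", counts.getD "a.total" 0),
                 ("with_cookies", counts.getD "a.cookies" 0),
                 ("with_token", counts.getD "a.token" 0),
                 ("with_2fa", counts.getD "a.2fa" 0),
                 ("with_email", counts.getD "a.email" 0)]),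
   ("proxies", [("total", counts.getD "p.total" 0),
                ("with_auth", counts.getD "p.auth" 0),
                ("http", counts.getD "p.http" 0),
                ("socks5", counts.getD "p.socks5" 0)])]

-- ===== PRECONDITION & SPEC =====
def Spec_get_import_stats (accounts : List (List (String × String))) (proxies : List (List (String × String))) (out : List (String × List (String × Int))) : Prop := out = get_import_stats_alt accounts proxies
instance (accounts : List (List (String × String))) (proxies : List (List (String × String))) (out : List (String × List (String × Int))) : Decidable (Spec_get_import_stats accounts proxies out) := by unfold Spec_get_import_stats; infer_instance

-- ===== CLAIM (what is proved, stated in full; the proofs are below) =====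
def Claim_equal_get_import_stats : Prop := ∀ (accounts : List (List (String × String))) (proxies : List (List (String × String))), Dom_get_import_stats accounts proxies → Spec_get_import_stats accounts proxies (get_import_stats accounts proxies)

-- ===== LEMMAS AND PROOFS =====

-- a count-fold started at n is n plus the count started at 0
theorem sumIf_shift (xs : List (List (String × String))) (f : List (String × String) → Bool) (n : Int) :
    xs.foldl (fun acc x => if f x then acc + 1 else acc) n = n + pvSumIf xs f := by
  induction xs generalizing n with
  | nil => simp [pvSumIf]
  | cons a rest ih =>
    simp only [pvSumIf, List.foldl_cons]
    rw [ih, ih]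
    by_cases h : f a <;> simp [h] <;> try ring

theorem sumIf_cons (a : List (String × String)) (rest : List (List (String × String))) (f : List (String × String) → Bool) :
    pvSumIf (a :: rest) f = (if f a then (1 : Int) else 0) + pvSumIf rest f := by
  simp only [pvSumIf, List.foldl_cons]
  by_cases h : f a <;> simp [h, sumIf_shift rest f]

-- counting v in a flatMapped label stream = the conditional sum, when each element
-- contributes v exactly (if g x then once else never)
theorem count_flatMap_eq_sumIf (xs : List (List (String × String)))
    (f : List (String × String) → List String) (v : String)
    (g : List (String × String) → Bool)
    (h : ∀ x, ((f x).count v : Int) = if g x then 1 else 0) :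
    ((xs.flatMap f).count v : Int) = pvSumIf xs g := by
  induction xs with
  | nil => simp [pvSumIf]
  | cons a rest ih =>
    rw [sumIf_cons]
    simp only [List.flatMap_cons, List.count_append]
    push_cast
    rw [ih, h a]

-- counting v in a flatMapped stream that never contains v
theorem count_flatMap_zero (xs : List (List (String × String)))
    (f : List (String × String) → List String) (v : String)
    (h : ∀ x, (f x).count v = 0) :
    (xs.flatMap f).count v = 0 := by
  induction xs with
  | nil => simp
  | cons a rest ih => simp [List.count_append, h a, ih]

-- sum(1 for each element) = length
theorem sumIf_true (xs : List (List (String × String))) :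
    pvSumIf xs (fun _ => true) = xs.length := by
  induction xs with
  | nil => simp [pvSumIf]
  | cons a rest ih => rw [sumIf_cons]; simp [ih]; ring

-- ===== VERDICT (by name: the statement is the Claim_ definition above) =====
theorem get_import_stats_spec : Claim_equal_get_import_stats := by
  intro accounts proxies _
  unfold Spec_get_import_stats get_import_stats get_import_stats_alt
  simp only [PySem.Dict.getD_foldl_insert_add_one, PySem.Dict.getD_empty, List.count_append]
  push_cast
  rw [count_flatMap_eq_sumIf accounts pvAccLabels "a.total" (fun _ => true)
        (by intro x; simp [pvAccLabels, List.count_append]; split_ifs <;> simp),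
      count_flatMap_eq_sumIf accounts pvAccLabels "a.cookies" (fun a => pvGetTruthy a "cookies")
        (by intro x; simp [pvAccLabels, List.count_append]; split_ifs <;> simp),
      count_flatMap_eq_sumIf accounts pvAccLabels "a.token" (fun a => pvGetTruthy a "access_token")
        (by intro x; simp [pvAccLabels, List.count_append]; split_ifs <;> simp),
      count_flatMap_eq_sumIf accounts pvAccLabels "a.2fa" (fun a => pvGetTruthy a "two_fa_key")
        (by intro x; simp [pvAccLabels, List.count_append]; split_ifs <;> simp),
      count_flatMap_eq_sumIf accounts pvAccLabels "a.email" (fun a => pvGetTruthy a "email")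
        (by intro x; simp [pvAccLabels, List.count_append]; split_ifs <;> simp),
      count_flatMap_eq_sumIf proxies pvProxLabels "p.total" (fun _ => true)
        (by intro x; simp [pvProxLabels, List.count_append]; split_ifs <;> simp),
      count_flatMap_eq_sumIf proxies pvProxLabels "p.auth" (fun p => pvGetTruthy p "username")
        (by intro x; simp [pvProxLabels, List.count_append]; split_ifs <;> simp),
      count_flatMap_eq_sumIf proxies pvProxLabels "p.http" (fun p => pvGetEq p "protocol" "http")
        (by intro x; simp [pvProxLabels, List.count_append]; split_ifs <;> simp),
      count_flatMap_eq_sumIf proxies pvProxLabels "p.socks5" (fun p => pvGetEq p "protocol" "socks5")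
        (by intro x; simp [pvProxLabels, List.count_append]; split_ifs <;> simp),
      sumIf_true, sumIf_true]
  rw [count_flatMap_zero proxies pvProxLabels "a.total"
        (by intro x; simp [pvProxLabels, List.count_append]; split_ifs <;> simp),
      count_flatMap_zero proxies pvProxLabels "a.cookies"
        (by intro x; simp [pvProxLabels, List.count_append]; split_ifs <;> simp),
      count_flatMap_zero proxies pvProxLabels "a.token"
        (by intro x; simp [pvProxLabels, List.count_append]; split_ifs <;> simp),
      count_flatMap_zero proxies pvProxLabels "a.2fa"
        (by intro x; simp [pvProxLabels, List.count_append]; split_ifs <;> simp),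
      count_flatMap_zero proxies pvProxLabels "a.email"
        (by intro x; simp [pvProxLabels, List.count_append]; split_ifs <;> simp),
      count_flatMap_zero accounts pvAccLabels "p.total"
        (by intro x; simp [pvAccLabels, List.count_append]; split_ifs <;> simp),
      count_flatMap_zero accounts pvAccLabels "p.auth"
        (by intro x; simp [pvAccLabels, List.count_append]; split_ifs <;> simp),
      count_flatMap_zero accounts pvAccLabels "p.http"
        (by intro x; simp [pvAccLabels, List.count_append]; split_ifs <;> simp),
      count_flatMap_zero accounts pvAccLabels "p.socks5"
        (by intro x; simp [pvAccLabels, List.count_append]; split_ifs <;> simp)]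
  simp
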